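-- pv_equiv track=rewrite | github.com/sunghyuny/RAG_Practice | rag_system/qa.py | infer_query_agency
-- ===== SOURCE A (Python) =====
-- from typing import List, Optional
--
-- def infer_query_agency(query: str, all_issuers: List[str]) -> Optional[str]:
--     lowered_query = query.lower()
--     matches = []
--
--     for issuer in all_issuers:
--         lowered_issuer = issuer.lower()
--         if lowered_issuer in lowered_query or lowered_query in lowered_issuer:
--             matches.append(issuer)
--
--     if not matches:
--         return None
--     return max(matches, key=len)
-- ===== SOURCE B (Python) =====
-- def infer_query_agency(query, all_issuers):
--     lowered_query = query.lower()
--     for issuer in sorted(all_issuers, key=len, reverse=True):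
--         lowered_issuer = issuer.lower()
--         if lowered_issuer in lowered_query or lowered_query in lowered_issuer:
--             return issuer
--     return None
-- ===== Notes on version B (the rewrite author's own statement) =====
-- stated objective: faster
-- what changed: Replaces filter-then-max with sort-then-scan: stably sort the issuers by length descending and return the first one passing the bidirectional substring test (stability preserves max's first-wins tie-break); no matches list, no max pass, and the scan stops at the first match instead of substring-testing every issuer.
import Mathlib
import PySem

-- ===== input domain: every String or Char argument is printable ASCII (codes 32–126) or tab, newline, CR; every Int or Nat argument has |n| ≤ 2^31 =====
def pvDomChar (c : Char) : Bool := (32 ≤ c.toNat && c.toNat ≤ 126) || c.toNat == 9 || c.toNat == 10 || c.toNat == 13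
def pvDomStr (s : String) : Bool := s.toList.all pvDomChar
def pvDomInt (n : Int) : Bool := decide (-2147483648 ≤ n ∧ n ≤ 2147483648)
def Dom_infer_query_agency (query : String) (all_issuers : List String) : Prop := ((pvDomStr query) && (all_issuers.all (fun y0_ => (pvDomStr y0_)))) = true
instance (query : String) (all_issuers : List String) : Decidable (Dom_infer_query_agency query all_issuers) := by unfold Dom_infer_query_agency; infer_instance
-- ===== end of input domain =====

-- B replaces A's filter-then-max with sort-then-scan: stable sort by length descending, return the first match.
-- ===== PORT A =====
def infer_query_agency (query : String) (all_issuers : List String) : Option String :=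
  let lowered_query := PySem.Str.lower query
  let matchList := all_issuers.foldl (fun acc issuer =>
    let lowered_issuer := PySem.Str.lower issuer
    if PySem.Str.isIn lowered_issuer lowered_query || PySem.Str.isIn lowered_query lowered_issuer then
      acc ++ [issuer]
    else acc) []
  if matchList.isEmpty then none
  else PySem.List.max? matchList (fun s => PySem.Str.len s)

-- ===== PORT B =====
def infer_query_agency_alt (query : String) (all_issuers : List String) : Option String :=
  let lowered_query := PySem.Str.lower query
  (PySem.List.sorted all_issuers (fun s => PySem.Str.len s) true).find? (fun issuer =>
    let lowered_issuer := PySem.Str.lower issuer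
    PySem.Str.isIn lowered_issuer lowered_query || PySem.Str.isIn lowered_query lowered_issuer)

-- ===== PRECONDITION & SPEC =====
def Spec_infer_query_agency (query : String) (all_issuers : List String) (out : Option String) : Prop := out = infer_query_agency_alt query all_issuers
instance (query : String) (all_issuers : List String) (out : Option String) : Decidable (Spec_infer_query_agency query all_issuers out) := by unfold Spec_infer_query_agency; infer_instance

-- ===== CLAIM =====
def Claim_equal_infer_query_agency : Prop := ∀ (query : String) (all_issuers : List String), Dom_infer_query_agency query all_issuers → Spec_infer_query_agency query all_issuers (infer_query_agency query all_issuers)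

-- ===== LEMMAS AND PROOFS =====

-- filtering commutes with inserting into a key-descending list
lemma filter_insertBy {α : Type} (key : α → Int) (p : α → Bool) (x : α) (acc : List α)
    (h : acc.Pairwise (fun a b => key b ≤ key a)) :
    (PySem.List.insertBy (fun a b => decide (key b < key a)) x acc).filter p =
      if p x then PySem.List.insertBy (fun a b => decide (key b < key a)) x (acc.filter p)
      else acc.filter p := by
  induction acc with
  | nil =>
    simp [PySem.List.insertBy, List.filter]
    split <;> simp_all
  | cons y ys ih =>
    rw [List.pairwise_cons] at h
    obtain ⟨hy, hys⟩ := h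
    by_cases hxy : key y < key x
    · -- x goes in front of y
      have hstep : PySem.List.insertBy (fun a b => decide (key b < key a)) x (y :: ys)
          = x :: y :: ys := by simp [PySem.List.insertBy, hxy]
      rw [hstep]
      by_cases hpx : p x
      · -- every survivor of filter p (y :: ys) has key < key x, so x is inserted at its head
        have hfront : ∀ zs : List α, (∀ z ∈ zs, key z < key x) →
            PySem.List.insertBy (fun a b => decide (key b < key a)) x zs = x :: zs := by
          intro zs hz
          cases zs with
          | nil => rfl
          | cons z t => simp [PySem.List.insertBy, hz z (by simp)]
        have hmem : ∀ z ∈ (y :: ys).filter p, key z < key x := by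
          intro z hz
          have hz' := List.mem_of_mem_filter hz
          rcases List.mem_cons.mp hz' with h | h
          · exact h ▸ hxy
          · exact lt_of_le_of_lt (hy z h) hxy
        rw [if_pos hpx, hfront _ hmem]
        simp [List.filter, hpx]
      · simp [List.filter, hpx]
    · -- x goes past y
      have hstep : PySem.List.insertBy (fun a b => decide (key b < key a)) x (y :: ys)
          = y :: PySem.List.insertBy (fun a b => decide (key b < key a)) x ys := by
        simp [PySem.List.insertBy, hxy]
      rw [hstep]
      by_cases hpy : p y
      · have : PySem.List.insertBy (fun a b => decide (key b < key a)) x (y :: ys.filter p)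
            = y :: PySem.List.insertBy (fun a b => decide (key b < key a)) x (ys.filter p) := by
          simp [PySem.List.insertBy, hxy]
        simp only [List.filter_cons, hpy, if_pos, ih hys]
        split <;> simp_all
      · simp only [List.filter_cons, hpy, ih hys]
        simp

-- appending one element to the input inserts it into the reverse-sorted list
lemma sorted_rev_append_singleton {α : Type} (key : α → Int) (xs : List α) (x : α) :
    PySem.List.sorted (xs ++ [x]) key true =
      PySem.List.insertBy (fun a b => decide (key b < key a)) x (PySem.List.sorted xs key true) := by
  rw [PySem.List.sorted_rev_eq_foldl_insertBy, List.foldl_append, ← PySem.List.sorted_rev_eq_foldl_insertBy]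
  rfl

-- filtering commutes with the stable reverse sort
lemma filter_sorted_rev {α : Type} (key : α → Int) (p : α → Bool) (xs : List α) :
    (PySem.List.sorted xs key true).filter p = PySem.List.sorted (xs.filter p) key true := by
  induction xs using List.reverseRecOn with
  | nil => rfl
  | append_singleton xs x ih =>
    rw [sorted_rev_append_singleton,
      filter_insertBy key p x _ (PySem.List.sorted_pairwise_rev xs key), List.filter_append]
    by_cases hpx : p x
    · rw [if_pos hpx, ih]
      simp [hpx, sorted_rev_append_singleton]
    · rw [if_neg hpx, ih]
      simp [hpx]

-- the head of the stable reverse sort is Python's max(key=...): the FIRST element of maximal key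
lemma head_sorted_rev_eq_max? {α : Type} (key : α → Int) (ys : List α) :
    (PySem.List.sorted ys key true).head? = PySem.List.max? ys key := by
  induction ys using List.reverseRecOn with
  | nil => rfl
  | append_singleton ys y ih =>
    rw [sorted_rev_append_singleton]
    unfold PySem.List.max?
    rw [List.foldl_append]
    unfold PySem.List.max? at ih
    rw [← ih]
    cases hs : PySem.List.sorted ys key true with
    | nil => rfl
    | cons m t =>
      by_cases hmy : key m < key y
      · simp [PySem.List.insertBy, hmy]
      · simp [PySem.List.insertBy, hmy]

lemma alt_eq_max?_filter (query : String) (all_issuers : List String) :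
    infer_query_agency_alt query all_issuers =
      PySem.List.max?
        (all_issuers.filter (fun issuer =>
          PySem.Str.isIn (PySem.Str.lower issuer) (PySem.Str.lower query) ||
          PySem.Str.isIn (PySem.Str.lower query) (PySem.Str.lower issuer)))
        (fun s => PySem.Str.len s) := by
  unfold infer_query_agency_alt
  dsimp only
  rw [← List.head?_filter]
  rw [filter_sorted_rev, head_sorted_rev_eq_max?]

theorem infer_query_agency_spec : Claim_equal_infer_query_agency := by
  intro query all_issuers _
  unfold Spec_infer_query_agency
  rw [alt_eq_max?_filter]
  unfold infer_query_agency
  dsimp only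
  rw [PySem.List.foldl_append_if]
  simp only [List.nil_append, List.map_id']
  split
  · rename_i h
    rw [List.isEmpty_iff] at h
    rw [h]
    rfl
  · rfl
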